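-- pv_equiv track=rewrite | github.com/cgshpi/Large-Scale-Evaluation-of-Topic-Models-and-Dimensionality-Reduction-Methods-for-2D-Text-Spatializati | code_preprocessing.py | corpus_dot_split
-- ===== SOURCE A (Python) =====
-- def dot_split(str):
--     return str.split(".")
--
-- def corpus_dot_split(corpus):
--     corpus_dot_split = []
--     for document in corpus:
--         document_dot_split = []
--         for term in document:
--             document_dot_split = document_dot_split + dot_split(term)
--         corpus_dot_split.append(document_dot_split)
--     return corpus_dot_split
-- ===== SOURCE B (Python) =====
-- def corpus_dot_split(corpus):
--     return ['.'.join(document).split('.') if document else [] for document in corpus]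
-- ===== Notes on version B (the rewrite author's own statement) =====
-- stated objective: simpler
-- what changed: Replaces the inner per-term split-and-repeated-list-concatenation loop by a single join of the whole document with '.' followed by one split, in a one-line comprehension (empty documents yield []).
import Mathlib
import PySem

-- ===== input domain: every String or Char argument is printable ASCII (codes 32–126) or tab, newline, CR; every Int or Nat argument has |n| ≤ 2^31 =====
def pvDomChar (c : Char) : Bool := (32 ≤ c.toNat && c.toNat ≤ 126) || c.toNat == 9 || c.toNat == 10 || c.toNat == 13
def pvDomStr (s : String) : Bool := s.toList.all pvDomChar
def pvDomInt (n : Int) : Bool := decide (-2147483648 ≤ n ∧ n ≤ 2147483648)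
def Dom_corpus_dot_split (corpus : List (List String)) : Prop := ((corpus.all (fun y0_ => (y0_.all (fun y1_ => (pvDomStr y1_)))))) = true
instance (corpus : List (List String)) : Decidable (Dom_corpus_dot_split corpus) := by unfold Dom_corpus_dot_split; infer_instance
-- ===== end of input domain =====

-- B replaces A's inner split-and-concatenate loop by one join-with-'.' and a single split per
-- document (objective: simpler).

-- ===== PORT A =====
-- s.split("."): the separator is the nonempty literal ".", so Python never raises;
-- exact via PySem.Chars.splitOn.
def dot_split (s : String) : List String :=
  (PySem.Chars.splitOn s.toList ['.']).map String.ofList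

def corpus_dot_split (corpus : List (List String)) : List (List String) :=
  corpus.foldl (fun acc document =>
    acc ++ [document.foldl (fun d term => d ++ dot_split term) []]) []

-- ===== PORT B =====
def corpus_dot_split_alt (corpus : List (List String)) : List (List String) :=
  corpus.map (fun document =>
    if document.isEmpty then []
    else (PySem.Chars.splitOn (PySem.Str.join "." document).toList ['.']).map String.ofList)

-- ===== PRECONDITION & SPEC =====
def Spec_corpus_dot_split (corpus : List (List String)) (out : List (List String)) : Prop := out = corpus_dot_split_alt corpus
instance (corpus : List (List String)) (out : List (List String)) : Decidable (Spec_corpus_dot_split corpus out) := by unfold Spec_corpus_dot_split; infer_instance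

-- ===== CLAIM (what is proved, stated in full; the proofs are below) =====
def Claim_equal_corpus_dot_split : Prop := ∀ (corpus : List (List String)), Dom_corpus_dot_split corpus → Spec_corpus_dot_split corpus (corpus_dot_split corpus)

-- ===== LEMMAS AND PROOFS =====

-- fuel-free characterisation of PySem.Chars.splitOn with the single-char separator '.'
def spl : List Char → List (List Char)
  | [] => [[]]
  | c :: rest =>
    if c = '.' then [] :: spl rest
    else match spl rest with
      | [] => [[c]]
      | p :: ps => (c :: p) :: ps

theorem spl_ne_nil (l : List Char) : spl l ≠ [] := by
  cases l with
  | nil => simp [spl]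
  | cons c rest =>
    simp only [spl]
    split
    · simp
    · split <;> simp

theorem spl_head_tail (l : List Char) : (spl l).head! :: (spl l).tail = spl l := by
  rcases hs : spl l with _ | ⟨p, ps⟩
  · exact absurd hs (spl_ne_nil l)
  · simp

theorem go_eq (fuel : Nat) (l cur : List Char) (acc : List (List Char)) (h : l.length < fuel) :
    PySem.Chars.splitOn.go ['.'] fuel l cur acc
      = acc.reverse ++ ((cur.reverse ++ (spl l).head!) :: (spl l).tail) := by
  induction fuel generalizing l cur acc with
  | zero => omega
  | succ f ih =>
    cases l with
    | nil => simp [PySem.Chars.splitOn.go, spl]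
    | cons c rest =>
      rw [PySem.Chars.splitOn.go]
      by_cases hc : c = '.'
      · subst hc
        have hp : ['.'].isPrefixOf ('.' :: rest) = true := by simp [List.isPrefixOf]
        rw [if_pos hp]
        rw [ih _ _ _ (by simpa using Nat.lt_of_succ_lt_succ (by simpa using h))]
        simp [spl, spl_head_tail]
      · have hp : ['.'].isPrefixOf (c :: rest) = false := by
          simp [List.isPrefixOf]; exact fun h => hc h.symm
        rw [if_neg (by simp [hp])]
        rw [ih _ _ _ (by simpa using Nat.lt_of_succ_lt_succ (by simpa using h))]
        simp only [spl, if_neg hc]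
        rcases hs : spl rest with _ | ⟨p, ps⟩
        · exact absurd hs (spl_ne_nil rest)
        · simp

theorem splitOn_eq_spl (l : List Char) : PySem.Chars.splitOn l ['.'] = spl l := by
  rw [PySem.Chars.splitOn, go_eq _ _ _ _ (by omega)]
  simp [spl_head_tail]

theorem spl_append (u v : List Char) : spl (u ++ '.' :: v) = spl u ++ spl v := by
  induction u with
  | nil => simp [spl]
  | cons c u ih =>
    by_cases hc : c = '.'
    · subst hc; simp [spl, ih]
    · simp only [List.cons_append, spl, if_neg hc, ih]
      rcases hs : spl u with _ | ⟨p, ps⟩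
      · exact absurd hs (spl_ne_nil u)
      · simp

theorem spl_join (parts : List (List Char)) (h : parts ≠ []) :
    spl (PySem.Chars.join ['.'] parts) = parts.flatMap spl := by
  induction parts with
  | nil => exact absurd rfl h
  | cons p rest ih =>
    cases rest with
    | nil => simp [PySem.Chars.join_singleton]
    | cons q rs =>
      rw [PySem.Chars.join_cons_cons]
      have : p ++ ['.'] ++ PySem.Chars.join ['.'] (q :: rs)
          = p ++ '.' :: PySem.Chars.join ['.'] (q :: rs) := by simp
      rw [this, spl_append, ih (by simp)]
      simp

theorem corpus_dot_split_spec_aux (corpus : List (List String)) :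
    corpus_dot_split corpus = corpus_dot_split_alt corpus := by
  unfold corpus_dot_split corpus_dot_split_alt
  rw [PySem.List.foldl_append_singleton_eq_map]
  refine List.map_congr_left fun document _ => ?_
  rw [PySem.List.foldl_append_eq_flatMap]
  cases document with
  | nil => simp
  | cons t rest =>
    have hne : ((t :: rest).map String.toList) ≠ [] := by simp
    have hj : (PySem.Str.join "." (t :: rest)).toList
        = PySem.Chars.join ['.'] ((t :: rest).map String.toList) := by
      simp [PySem.Str.join]
    simp only [List.isEmpty_cons, if_neg (by simp : ¬((false : Bool) = true)), List.nil_append]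
    rw [hj, splitOn_eq_spl, spl_join _ hne]
    simp only [List.flatMap_map]
    rw [List.map_flatMap]
    refine List.flatMap_congr ?_
    intro s _
    simp [dot_split, splitOn_eq_spl]

-- ===== VERDICT (by name: the statement is the Claim_ definition above) =====
theorem corpus_dot_split_spec : Claim_equal_corpus_dot_split := by
  intro corpus _
  unfold Spec_corpus_dot_split
  exact corpus_dot_split_spec_aux corpus
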